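-- pv_equiv track=rewrite | github.com/rrameshh/stlq | models/load_pretrained.py | _create_resnet_mapping
-- ===== SOURCE A (Python) =====
-- def _create_resnet_mapping(custom_dict, num_classes, variant="18"):
--
--     mapping = {
--         'conv1.weight': 'conv1.conv2d.weight',
--         'bn1.weight': 'conv1.bn2d.weight',
--         'bn1.bias': 'conv1.bn2d.bias',
--         'bn1.running_mean': 'conv1.bn2d.running_mean',
--         'bn1.running_var': 'conv1.bn2d.running_var',
--         'bn1.num_batches_tracked': 'conv1.bn2d.num_batches_tracked',
--     }
--
--     if variant == '18':
--         layer_blocks = [2, 2, 2, 2]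
--         num_convs = 2
--     elif variant in '50':
--         layer_blocks = [3, 4, 6, 3]  # ResNet-50
--         num_convs = 3
--     else:
--         raise ValueError(f"Unknown ResNet variant: {variant}")
--
--     # Layer blocks - dynamically handle different numbers of blocks
--     for layer_idx in range(1, 5):
--         num_blocks = layer_blocks[layer_idx - 1]
--         for block_idx in range(num_blocks):
--             for conv_idx in range(1, num_convs + 1):
--                 mapping.update({
--                     f'layer{layer_idx}.{block_idx}.conv{conv_idx}.weight': f'layer{layer_idx}.{block_idx}.conv{conv_idx}.conv2d.weight',
--                     f'layer{layer_idx}.{block_idx}.bn{conv_idx}.weight': f'layer{layer_idx}.{block_idx}.conv{conv_idx}.bn2d.weight',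
--                     f'layer{layer_idx}.{block_idx}.bn{conv_idx}.bias': f'layer{layer_idx}.{block_idx}.conv{conv_idx}.bn2d.bias',
--                     f'layer{layer_idx}.{block_idx}.bn{conv_idx}.running_mean': f'layer{layer_idx}.{block_idx}.conv{conv_idx}.bn2d.running_mean',
--                     f'layer{layer_idx}.{block_idx}.bn{conv_idx}.running_var': f'layer{layer_idx}.{block_idx}.conv{conv_idx}.bn2d.running_var',
--                     f'layer{layer_idx}.{block_idx}.bn{conv_idx}.num_batches_tracked': f'layer{layer_idx}.{block_idx}.conv{conv_idx}.bn2d.num_batches_tracked',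
--                 })
--
--     # Downsample layers (only for layers 2, 3, 4)
--     for layer_idx in [2, 3, 4]:
--         mapping.update({
--             f'layer{layer_idx}.0.downsample.0.weight': f'layer{layer_idx}.0.downsample.0.conv2d.weight',
--             f'layer{layer_idx}.0.downsample.1.weight': f'layer{layer_idx}.0.downsample.0.bn2d.weight',
--             f'layer{layer_idx}.0.downsample.1.bias': f'layer{layer_idx}.0.downsample.0.bn2d.bias',
--             f'layer{layer_idx}.0.downsample.1.running_mean': f'layer{layer_idx}.0.downsample.0.bn2d.running_mean',
--             f'layer{layer_idx}.0.downsample.1.running_var': f'layer{layer_idx}.0.downsample.0.bn2d.running_var',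
--             f'layer{layer_idx}.0.downsample.1.num_batches_tracked': f'layer{layer_idx}.0.downsample.0.bn2d.num_batches_tracked',
--         })
--
--     if 'fc.linear.weight' in custom_dict:
--         mapping.update({
--             'fc.weight': 'fc.linear.weight',
--             'fc.bias': 'fc.linear.bias',
--         })
--     else:
--         mapping.update({
--             'fc.weight': 'fc.weight',
--             'fc.bias': 'fc.bias',
--         })
--
--     return mapping
-- ===== SOURCE B (Python) =====
-- def _create_resnet_mapping(custom_dict, num_classes, variant="18"):
--     if variant == '18':
--         layer_blocks, num_convs = [2, 2, 2, 2], 2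
--     elif variant in '50':
--         layer_blocks, num_convs = [3, 4, 6, 3], 3
--     else:
--         raise ValueError(f"Unknown ResNet variant: {variant}")
--
--     # One uniform table of (conv_source, bn_source, target_base) modules.
--     modules = [('conv1', 'bn1', 'conv1')]
--     for l in range(1, 5):
--         for b in range(layer_blocks[l - 1]):
--             for c in range(1, num_convs + 1):
--                 p = f'layer{l}.{b}'
--                 modules.append((f'{p}.conv{c}', f'{p}.bn{c}', f'{p}.conv{c}'))
--     for l in [2, 3, 4]:
--         p = f'layer{l}.0.downsample'
--         modules.append((f'{p}.0', f'{p}.1', f'{p}.0'))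
--
--     suffixes = ['weight', 'bias', 'running_mean', 'running_var', 'num_batches_tracked']
--     mapping = {}
--     for conv_src, bn_src, dst in modules:
--         mapping[f'{conv_src}.weight'] = f'{dst}.conv2d.weight'
--         for s in suffixes:
--             mapping[f'{bn_src}.{s}'] = f'{dst}.bn2d.{s}'
--
--     if 'fc.linear.weight' in custom_dict:
--         mapping['fc.weight'] = 'fc.linear.weight'
--         mapping['fc.bias'] = 'fc.linear.bias'
--     else:
--         mapping['fc.weight'] = 'fc.weight'
--         mapping['fc.bias'] = 'fc.bias'
--     return mapping
-- ===== Notes on version B (the rewrite author's own statement) =====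
-- stated objective: simpler
-- what changed: B replaces A's three hand-written mapping sections (stem literals, a triple loop writing six f-string entries, a downsample loop writing six more) by one uniform table of (conv_src, bn_src, target) modules folded with a single shared bn-suffix list.
import Mathlib
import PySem

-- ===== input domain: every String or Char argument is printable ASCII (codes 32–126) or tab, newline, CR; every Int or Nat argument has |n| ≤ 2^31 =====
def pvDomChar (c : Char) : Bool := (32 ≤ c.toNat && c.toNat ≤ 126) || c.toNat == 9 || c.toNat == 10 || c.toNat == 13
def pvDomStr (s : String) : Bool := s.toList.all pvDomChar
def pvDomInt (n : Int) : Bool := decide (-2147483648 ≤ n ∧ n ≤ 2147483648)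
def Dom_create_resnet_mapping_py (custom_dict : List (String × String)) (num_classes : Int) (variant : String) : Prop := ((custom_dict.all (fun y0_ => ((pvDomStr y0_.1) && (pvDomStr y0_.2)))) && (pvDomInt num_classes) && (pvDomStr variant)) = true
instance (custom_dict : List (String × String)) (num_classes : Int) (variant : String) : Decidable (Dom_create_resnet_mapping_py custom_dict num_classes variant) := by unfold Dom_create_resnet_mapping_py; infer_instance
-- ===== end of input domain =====

-- B replaces A's three hand-written mapping sections by one table of (conv_src, bn_src, target)
-- modules folded with a shared bn-suffix list (objective: simpler). Equivalence of the RETURN value.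

-- f-string concatenation (Python-exact string concat)
def pvCat (xs : List String) : String := PySem.Str.join "" xs

-- ===== PORT A =====
-- one `mapping.update({...})` body of the triple loop (6 literal f-string entries, in order)
def pvUpdBlockA (m : PySem.Dict String String) (l b c : Int) : PySem.Dict String String :=
  let li := PySem.Int.toStr l
  let bi := PySem.Int.toStr b
  let ci := PySem.Int.toStr c
  ((((((m.insert (pvCat ["layer", li, ".", bi, ".conv", ci, ".weight"]) (pvCat ["layer", li, ".", bi, ".conv", ci, ".conv2d.weight"])).insert
      (pvCat ["layer", li, ".", bi, ".bn", ci, ".weight"]) (pvCat ["layer", li, ".", bi, ".conv", ci, ".bn2d.weight"])).insert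
      (pvCat ["layer", li, ".", bi, ".bn", ci, ".bias"]) (pvCat ["layer", li, ".", bi, ".conv", ci, ".bn2d.bias"])).insert
      (pvCat ["layer", li, ".", bi, ".bn", ci, ".running_mean"]) (pvCat ["layer", li, ".", bi, ".conv", ci, ".bn2d.running_mean"])).insert
      (pvCat ["layer", li, ".", bi, ".bn", ci, ".running_var"]) (pvCat ["layer", li, ".", bi, ".conv", ci, ".bn2d.running_var"])).insert
      (pvCat ["layer", li, ".", bi, ".bn", ci, ".num_batches_tracked"]) (pvCat ["layer", li, ".", bi, ".conv", ci, ".bn2d.num_batches_tracked"]))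

-- one `mapping.update({...})` of the downsample loop
def pvUpdDownA (m : PySem.Dict String String) (l : Int) : PySem.Dict String String :=
  let li := PySem.Int.toStr l
  ((((((m.insert (pvCat ["layer", li, ".0.downsample.0.weight"]) (pvCat ["layer", li, ".0.downsample.0.conv2d.weight"])).insert
      (pvCat ["layer", li, ".0.downsample.1.weight"]) (pvCat ["layer", li, ".0.downsample.0.bn2d.weight"])).insert
      (pvCat ["layer", li, ".0.downsample.1.bias"]) (pvCat ["layer", li, ".0.downsample.0.bn2d.bias"])).insert
      (pvCat ["layer", li, ".0.downsample.1.running_mean"]) (pvCat ["layer", li, ".0.downsample.0.bn2d.running_mean"])).insert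
      (pvCat ["layer", li, ".0.downsample.1.running_var"]) (pvCat ["layer", li, ".0.downsample.0.bn2d.running_var"])).insert
      (pvCat ["layer", li, ".0.downsample.1.num_batches_tracked"]) (pvCat ["layer", li, ".0.downsample.0.bn2d.num_batches_tracked"]))

-- the variant if/elif/else (raise ⇒ none)
def pvCfgA (variant : String) : Option (List Int × Int) :=
  if variant == "18" then some ([2, 2, 2, 2], 2)
  else if PySem.Str.isIn variant "50" then some ([3, 4, 6, 3], 3)
  else none

def create_resnet_mapping_py (custom_dict : List (String × String)) (num_classes : Int) (variant : String) : List (String × String) :=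
  let mapping : PySem.Dict String String := PySem.Dict.ofList
    [ ("conv1.weight", "conv1.conv2d.weight"),
      ("bn1.weight", "conv1.bn2d.weight"),
      ("bn1.bias", "conv1.bn2d.bias"),
      ("bn1.running_mean", "conv1.bn2d.running_mean"),
      ("bn1.running_var", "conv1.bn2d.running_var"),
      ("bn1.num_batches_tracked", "conv1.bn2d.num_batches_tracked") ]
  match pvCfgA variant with
  | none => []  -- Python raises ValueError here; excluded by Pre_
  | some (layer_blocks, num_convs) =>
    let mapping := (PySem.List.pyRange 1 5 1).foldl (fun m layer_idx =>
      -- layer_idx - 1 ∈ [0,3] is always in range, so pyGetD is exact for layer_blocks[layer_idx - 1]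
      let num_blocks := PySem.List.pyGetD layer_blocks (layer_idx - 1) 0
      (PySem.List.pyRange 0 num_blocks 1).foldl (fun m block_idx =>
        (PySem.List.pyRange 1 (num_convs + 1) 1).foldl (fun m conv_idx =>
          pvUpdBlockA m layer_idx block_idx conv_idx) m) m) mapping
    let mapping := ([2, 3, 4] : List Int).foldl (fun m layer_idx => pvUpdDownA m layer_idx) mapping
    let mapping := if (PySem.Dict.mk custom_dict).contains "fc.linear.weight" then
        (mapping.insert "fc.weight" "fc.linear.weight").insert "fc.bias" "fc.linear.bias"
      else
        (mapping.insert "fc.weight" "fc.weight").insert "fc.bias" "fc.bias"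
    mapping.items

-- ===== PORT B =====
-- the variant if/elif/else (raise ⇒ none)
def pvCfgB (variant : String) : Option (List Int × Int) :=
  if variant == "18" then some ([2, 2, 2, 2], 2)
  else if PySem.Str.isIn variant "50" then some ([3, 4, 6, 3], 3)
  else none

def create_resnet_mapping_py_alt (custom_dict : List (String × String)) (num_classes : Int) (variant : String) : List (String × String) :=
  match pvCfgB variant with
  | none => []  -- Python raises ValueError here; excluded by Pre_
  | some (layer_blocks, num_convs) =>
    let modules : List (String × String × String) :=
      (PySem.List.pyRange 1 5 1).foldl (fun ms l =>
        -- l - 1 ∈ [0,3] is always in range, so pyGetD is exact for layer_blocks[l - 1]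
        (PySem.List.pyRange 0 (PySem.List.pyGetD layer_blocks (l - 1) 0) 1).foldl (fun ms b =>
          (PySem.List.pyRange 1 (num_convs + 1) 1).foldl (fun ms c =>
            let p := pvCat ["layer", PySem.Int.toStr l, ".", PySem.Int.toStr b]
            ms ++ [(pvCat [p, ".conv", PySem.Int.toStr c],
                    pvCat [p, ".bn", PySem.Int.toStr c],
                    pvCat [p, ".conv", PySem.Int.toStr c])]) ms) ms)
        [("conv1", "bn1", "conv1")]
    let modules := modules ++ ([2, 3, 4] : List Int).foldl (fun ms l =>
        let p := pvCat ["layer", PySem.Int.toStr l, ".0.downsample"]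
        ms ++ [(pvCat [p, ".0"], pvCat [p, ".1"], pvCat [p, ".0"])]) []
    let suffixes : List String := ["weight", "bias", "running_mean", "running_var", "num_batches_tracked"]
    let mapping : PySem.Dict String String := modules.foldl (fun m md =>
        let m := m.insert (pvCat [md.1, ".weight"]) (pvCat [md.2.2, ".conv2d.weight"])
        suffixes.foldl (fun m s => m.insert (pvCat [md.2.1, ".", s]) (pvCat [md.2.2, ".bn2d.", s])) m)
      PySem.Dict.empty
    let mapping := if (PySem.Dict.mk custom_dict).contains "fc.linear.weight" then
        (mapping.insert "fc.weight" "fc.linear.weight").insert "fc.bias" "fc.linear.bias"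
      else
        (mapping.insert "fc.weight" "fc.weight").insert "fc.bias" "fc.bias"
    mapping.items

-- ===== PRECONDITION & SPEC =====
-- Pre_ excludes exactly the variants on which A raises ValueError: all strings other than "18"
-- and the four substrings of "50" (Python's `variant in '50'` is a substring test).
def Pre_create_resnet_mapping_py (custom_dict : List (String × String)) (num_classes : Int) (variant : String) : Prop :=
  variant = "18" ∨ variant = "" ∨ variant = "5" ∨ variant = "0" ∨ variant = "50"
instance (custom_dict : List (String × String)) (num_classes : Int) (variant : String) : Decidable (Pre_create_resnet_mapping_py custom_dict num_classes variant) := by unfold Pre_create_resnet_mapping_py; infer_instance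

def pvWitness_create_resnet_mapping_py : (List (String × String)) × Int × String := ([("fc.linear.weight", "w")], 10, "18")

def Spec_create_resnet_mapping_py (custom_dict : List (String × String)) (num_classes : Int) (variant : String) (out : List (String × String)) : Prop := out = create_resnet_mapping_py_alt custom_dict num_classes variant
instance (custom_dict : List (String × String)) (num_classes : Int) (variant : String) (out : List (String × String)) : Decidable (Spec_create_resnet_mapping_py custom_dict num_classes variant out) := by unfold Spec_create_resnet_mapping_py; infer_instance

-- ===== CLAIM (what is proved, stated in full; the proofs are below) =====
def Claim_equal_create_resnet_mapping_py : Prop := ∀ (custom_dict : List (String × String)) (num_classes : Int) (variant : String), Dom_create_resnet_mapping_py custom_dict num_classes variant → Pre_create_resnet_mapping_py custom_dict num_classes variant → Spec_create_resnet_mapping_py custom_dict num_classes variant (create_resnet_mapping_py custom_dict num_classes variant)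

-- ===== LEMMAS AND PROOFS =====
-- Lift both ports' insert loops to `pvIns` (sequential insertion of a pair list); then the two
-- dicts are `pvIns empty` of two concrete pair lists, and only a cheap list equality is decided.
def pvIns (d : PySem.Dict String String) (ps : List (String × String)) : PySem.Dict String String :=
  ps.foldl (fun d p => d.insert p.1 p.2) d

theorem pvIns_append (d : PySem.Dict String String) (ps qs : List (String × String)) :
    pvIns d (ps ++ qs) = pvIns (pvIns d ps) qs := List.foldl_append

theorem pvIns_foldl {a : Type} (xs : List a) (f : a → List (String × String)) (d : PySem.Dict String String) :
    xs.foldl (fun d x => pvIns d (f x)) d = pvIns d (xs.flatMap f) := by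
  induction xs generalizing d with
  | nil => rfl
  | cons x xs ih => simp [List.flatMap_cons, pvIns_append, ih]

def pvBlockPairsA (l b c : Int) : List (String × String) :=
  let li := PySem.Int.toStr l
  let bi := PySem.Int.toStr b
  let ci := PySem.Int.toStr c
  [ (pvCat ["layer", li, ".", bi, ".conv", ci, ".weight"], pvCat ["layer", li, ".", bi, ".conv", ci, ".conv2d.weight"]),
    (pvCat ["layer", li, ".", bi, ".bn", ci, ".weight"], pvCat ["layer", li, ".", bi, ".conv", ci, ".bn2d.weight"]),
    (pvCat ["layer", li, ".", bi, ".bn", ci, ".bias"], pvCat ["layer", li, ".", bi, ".conv", ci, ".bn2d.bias"]),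
    (pvCat ["layer", li, ".", bi, ".bn", ci, ".running_mean"], pvCat ["layer", li, ".", bi, ".conv", ci, ".bn2d.running_mean"]),
    (pvCat ["layer", li, ".", bi, ".bn", ci, ".running_var"], pvCat ["layer", li, ".", bi, ".conv", ci, ".bn2d.running_var"]),
    (pvCat ["layer", li, ".", bi, ".bn", ci, ".num_batches_tracked"], pvCat ["layer", li, ".", bi, ".conv", ci, ".bn2d.num_batches_tracked"]) ]

theorem pvUpdBlockA_eq (m : PySem.Dict String String) (l b c : Int) :
    pvUpdBlockA m l b c = pvIns m (pvBlockPairsA l b c) := rfl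

def pvDownPairsA (l : Int) : List (String × String) :=
  let li := PySem.Int.toStr l
  [ (pvCat ["layer", li, ".0.downsample.0.weight"], pvCat ["layer", li, ".0.downsample.0.conv2d.weight"]),
    (pvCat ["layer", li, ".0.downsample.1.weight"], pvCat ["layer", li, ".0.downsample.0.bn2d.weight"]),
    (pvCat ["layer", li, ".0.downsample.1.bias"], pvCat ["layer", li, ".0.downsample.0.bn2d.bias"]),
    (pvCat ["layer", li, ".0.downsample.1.running_mean"], pvCat ["layer", li, ".0.downsample.0.bn2d.running_mean"]),
    (pvCat ["layer", li, ".0.downsample.1.running_var"], pvCat ["layer", li, ".0.downsample.0.bn2d.running_var"]),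
    (pvCat ["layer", li, ".0.downsample.1.num_batches_tracked"], pvCat ["layer", li, ".0.downsample.0.bn2d.num_batches_tracked"]) ]

theorem pvUpdDownA_eq (m : PySem.Dict String String) (l : Int) :
    pvUpdDownA m l = pvIns m (pvDownPairsA l) := rfl

def pvModPairsB (md : String × String × String) : List (String × String) :=
  (pvCat [md.1, ".weight"], pvCat [md.2.2, ".conv2d.weight"]) ::
    (["weight", "bias", "running_mean", "running_var", "num_batches_tracked"] : List String).map
      (fun s => (pvCat [md.2.1, ".", s], pvCat [md.2.2, ".bn2d.", s]))

theorem pvBodyB_eq (m : PySem.Dict String String) (md : String × String × String) :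
    (["weight", "bias", "running_mean", "running_var", "num_batches_tracked"] : List String).foldl
      (fun m s => m.insert (pvCat [md.2.1, ".", s]) (pvCat [md.2.2, ".bn2d.", s]))
      (m.insert (pvCat [md.1, ".weight"]) (pvCat [md.2.2, ".conv2d.weight"]))
    = pvIns m (pvModPairsB md) := rfl

theorem pvStem_eq : PySem.Dict.ofList
    [("conv1.weight", "conv1.conv2d.weight"), ("bn1.weight", "conv1.bn2d.weight"),
        ("bn1.bias", "conv1.bn2d.bias"), ("bn1.running_mean", "conv1.bn2d.running_mean"),
        ("bn1.running_var", "conv1.bn2d.running_var"),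
        ("bn1.num_batches_tracked", "conv1.bn2d.num_batches_tracked")]
  = pvIns PySem.Dict.empty
    [("conv1.weight", "conv1.conv2d.weight"), ("bn1.weight", "conv1.bn2d.weight"),
        ("bn1.bias", "conv1.bn2d.bias"), ("bn1.running_mean", "conv1.bn2d.running_mean"),
        ("bn1.running_var", "conv1.bn2d.running_var"),
        ("bn1.num_batches_tracked", "conv1.bn2d.num_batches_tracked")] := by decide

set_option maxRecDepth 8000 in
set_option maxHeartbeats 4000000 in
theorem pv18 (cd : List (String × String)) (n : Int) :
    create_resnet_mapping_py cd n "18" = create_resnet_mapping_py_alt cd n "18" := by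
  simp only [create_resnet_mapping_py, create_resnet_mapping_py_alt, pvUpdBlockA_eq,
    pvUpdDownA_eq, pvBodyB_eq, pvIns_foldl, ← pvIns_append, pvStem_eq,
    show pvCfgA "18" = some (([2, 2, 2, 2] : List Int), (2 : Int)) from by decide,
    show pvCfgB "18" = some (([2, 2, 2, 2] : List Int), (2 : Int)) from by decide]
  rw [congrArg (pvIns PySem.Dict.empty) (show
    ([("conv1.weight", "conv1.conv2d.weight"), ("bn1.weight", "conv1.bn2d.weight"),
        ("bn1.bias", "conv1.bn2d.bias"), ("bn1.running_mean", "conv1.bn2d.running_mean"),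
        ("bn1.running_var", "conv1.bn2d.running_var"),
        ("bn1.num_batches_tracked", "conv1.bn2d.num_batches_tracked")] ++
      List.flatMap
        (fun x =>
          List.flatMap (fun x_1 => List.flatMap (pvBlockPairsA x x_1) (PySem.List.pyRange 1 (2 + 1)))
            (PySem.List.pyRange 0 (PySem.List.pyGetD [2, 2, 2, 2] (x - 1) 0)))
        (PySem.List.pyRange 1 5) ++
      List.flatMap pvDownPairsA [2, 3, 4]) = (List.flatMap pvModPairsB
      (List.foldl
          (fun ms l =>
            List.foldl
              (fun ms b =>
                List.foldl
                  (fun ms c =>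
                    ms ++
                      [(pvCat [pvCat ["layer", PySem.Int.toStr l, ".", PySem.Int.toStr b], ".conv", PySem.Int.toStr c],
                        pvCat [pvCat ["layer", PySem.Int.toStr l, ".", PySem.Int.toStr b], ".bn", PySem.Int.toStr c],
                        pvCat [pvCat ["layer", PySem.Int.toStr l, ".", PySem.Int.toStr b], ".conv", PySem.Int.toStr c])])
                  ms (PySem.List.pyRange 1 (2 + 1)))
              ms (PySem.List.pyRange 0 (PySem.List.pyGetD [2, 2, 2, 2] (l - 1) 0)))
          [("conv1", "bn1", "conv1")] (PySem.List.pyRange 1 5) ++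
        List.foldl
          (fun ms l =>
            ms ++
              [(pvCat [pvCat ["layer", PySem.Int.toStr l, ".0.downsample"], ".0"],
                pvCat [pvCat ["layer", PySem.Int.toStr l, ".0.downsample"], ".1"],
                pvCat [pvCat ["layer", PySem.Int.toStr l, ".0.downsample"], ".0"])])
          [] [2, 3, 4])) from by decide)]

set_option maxRecDepth 8000 in
set_option maxHeartbeats 4000000 in
theorem pv50 (cd : List (String × String)) (n : Int) :
    create_resnet_mapping_py cd n "50" = create_resnet_mapping_py_alt cd n "50" := by
  simp only [create_resnet_mapping_py, create_resnet_mapping_py_alt, pvUpdBlockA_eq,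
    pvUpdDownA_eq, pvBodyB_eq, pvIns_foldl, ← pvIns_append, pvStem_eq,
    show pvCfgA "50" = some (([3, 4, 6, 3] : List Int), (3 : Int)) from by decide,
    show pvCfgB "50" = some (([3, 4, 6, 3] : List Int), (3 : Int)) from by decide]
  rw [congrArg (pvIns PySem.Dict.empty) (show
    ([("conv1.weight", "conv1.conv2d.weight"), ("bn1.weight", "conv1.bn2d.weight"),
        ("bn1.bias", "conv1.bn2d.bias"), ("bn1.running_mean", "conv1.bn2d.running_mean"),
        ("bn1.running_var", "conv1.bn2d.running_var"),
        ("bn1.num_batches_tracked", "conv1.bn2d.num_batches_tracked")] ++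
      List.flatMap
        (fun x =>
          List.flatMap (fun x_1 => List.flatMap (pvBlockPairsA x x_1) (PySem.List.pyRange 1 (3 + 1)))
            (PySem.List.pyRange 0 (PySem.List.pyGetD [3, 4, 6, 3] (x - 1) 0)))
        (PySem.List.pyRange 1 5) ++
      List.flatMap pvDownPairsA [2, 3, 4]) = (List.flatMap pvModPairsB
      (List.foldl
          (fun ms l =>
            List.foldl
              (fun ms b =>
                List.foldl
                  (fun ms c =>
                    ms ++
                      [(pvCat [pvCat ["layer", PySem.Int.toStr l, ".", PySem.Int.toStr b], ".conv", PySem.Int.toStr c],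
                        pvCat [pvCat ["layer", PySem.Int.toStr l, ".", PySem.Int.toStr b], ".bn", PySem.Int.toStr c],
                        pvCat [pvCat ["layer", PySem.Int.toStr l, ".", PySem.Int.toStr b], ".conv", PySem.Int.toStr c])])
                  ms (PySem.List.pyRange 1 (3 + 1)))
              ms (PySem.List.pyRange 0 (PySem.List.pyGetD [3, 4, 6, 3] (l - 1) 0)))
          [("conv1", "bn1", "conv1")] (PySem.List.pyRange 1 5) ++
        List.foldl
          (fun ms l =>
            ms ++
              [(pvCat [pvCat ["layer", PySem.Int.toStr l, ".0.downsample"], ".0"],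
                pvCat [pvCat ["layer", PySem.Int.toStr l, ".0.downsample"], ".1"],
                pvCat [pvCat ["layer", PySem.Int.toStr l, ".0.downsample"], ".0"])])
          [] [2, 3, 4])) from by decide)]

theorem pvA50 (v : String) (h18 : (v == "18") = false) (h50 : PySem.Chars.isIn v.toList ['5', '0'] = true)
    (cd : List (String × String)) (n : Int) :
    create_resnet_mapping_py cd n v = create_resnet_mapping_py cd n "50" := by
  simp only [create_resnet_mapping_py]
  rw [show pvCfgA v = some ([3, 4, 6, 3], 3) from by simp [pvCfgA, h18, h50],
    show pvCfgA "50" = some ([3, 4, 6, 3], 3) from by decide]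

theorem pvB50 (v : String) (h18 : (v == "18") = false) (h50 : PySem.Chars.isIn v.toList ['5', '0'] = true)
    (cd : List (String × String)) (n : Int) :
    create_resnet_mapping_py_alt cd n v = create_resnet_mapping_py_alt cd n "50" := by
  simp only [create_resnet_mapping_py_alt]
  rw [show pvCfgB v = some ([3, 4, 6, 3], 3) from by simp [pvCfgB, h18, h50],
    show pvCfgB "50" = some ([3, 4, 6, 3], 3) from by decide]

-- ===== VERDICT (by name: the statement is the Claim_ definition above) =====
theorem create_resnet_mapping_py_spec : Claim_equal_create_resnet_mapping_py := by
  intro custom_dict num_classes variant _ hpre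
  unfold Spec_create_resnet_mapping_py
  rcases hpre with h | h | h | h | h <;> subst h
  · exact pv18 custom_dict num_classes
  · rw [pvA50 "" (by decide) (by decide), pvB50 "" (by decide) (by decide)]
    exact pv50 custom_dict num_classes
  · rw [pvA50 "5" (by decide) (by decide), pvB50 "5" (by decide) (by decide)]
    exact pv50 custom_dict num_classes
  · rw [pvA50 "0" (by decide) (by decide), pvB50 "0" (by decide) (by decide)]
    exact pv50 custom_dict num_classes
  · exact pv50 custom_dict num_classes
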